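-- pv_equiv track=rewrite | github.com/kkokay/De_DES | venv/des.py | ctrlBitReverse
-- ===== SOURCE A (Python) =====
-- def translate(strl, sys1, sys2):
-- # из двоичной в любую
--     if sys1 == 'b':
--         if sys2 == 'b':
--             return strl
--         elif sys2 == 'h':
--             out_1 = ''
--             temp_1 = [strl[i:i+8] for i in range(0, len(strl), 8)]
--             for i in temp_1:
--                 out_1+=str(hex(int(i,2))[2:]).zfill(2)
--             return out_1
--         else:
--             out_2 = ''
--             temp_2 = [strl[i:i+8] for i in range(0, len(strl), 8)]
--             for i in temp_2:
--                 temp_3 =int(i,2)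
--                 if (48<=temp_3<=57) or (65<=temp_3<=90) or (97<=temp_3<=122):
--                     out_2+=chr(temp_3)
--                 elif 192<=temp_3<=255:
--                     out_2+=chr(temp_3+848)
--                 elif temp_3 == 168:
--                     out_2+='Ё'
--                 elif temp_3 == 184:
--                     out_2+='ё'
--                 else:
--                     out_2+=chr(temp_3)
--             return out_2
-- # Перевод из симовольной в любую
--     elif sys1 == 's':
--         if sys2 == 's':
--             return strl
--         elif sys2 == 'b':
--             out_3 = ''
--             for i in strl:
--                 if 1040<=ord(i)<=1103:
--                     out_3+=str(bin(ord(i)-848))[2:].zfill(8)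
--                 elif ord(i) == 1105:
--                     out_3+='10111000'
--                 elif ord(i) == 1025:
--                     out_3+='10101000'
--                 else:
--                     out_3+=str( bin (   ord (i) )   )[2:].zfill(8)
--             return out_3
--         else:
--             out_4 = ''
--             for i in strl:
--                 if 1040<=ord(i)<=1103:
--                     out_4+=str(hex(ord(i)-848))[2:].zfill(2)
--                 elif ord(i) == 1105:
--                     out_4+='b8'
--                 elif ord(i) == 1025:
--                     out_4+='a8'
--                 else:
--                     out_4+=str(hex(ord(i)))[2:].zfill(2)
--             return out_4
-- # Из 16-ричной в любую
--     else:
--         if sys2 == 'h':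
--             return strl
--         elif sys2 == 's':
--             out_5 = ''
--             for i in range(0, len(strl), 2):
--                 temp_4 = strl[i:i+2]
--                 temp_5 = int(temp_4, 16)
--                 if 192<=temp_5<=255:
--                     out_5+=chr(temp_5+848)
--                 elif temp_5 == 168:
--                     out_5+='Ё'
--                 elif temp_5 == 184:
--                     out_5+='ё'
--                 else:
--                     out_5+=chr(temp_5)
--             return out_5
--         else:
--             out_6 = ''
--             for i in range(0, len(strl), 2):
--                 temp_6 = strl[i:i+2]
--                 out_6+=str(bin(int(temp_6, 16)))[2:].zfill(8)
--             return out_6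
--
-- def ctrlBitReverse(strk):
--     temp = translate(strk, 'h', 'b')
--     b = [temp[i:i + 8] for i in range(0, 64, 8)]
--     c = ''
--     for i in b:
--         c += i[0:7]
--     c1 = translate(c, 'b', 's')
--     return c1
-- ===== SOURCE B (Python) =====
-- def ctrlBitReverse(strk):
--     # Only the first 16 hex chars (64 bits) ever matter; work on integers, not binary strings.
--     head = strk[:16]
--     bits = []
--     for i in range(0, len(head), 2):
--         v = 0
--         for ch in head[i:i+2]:
--             v = 16 * v + "0123456789abcdef".index(ch.lower())
--         for k in range(7):
--             bits.append(v >> (7 - k) & 1)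
--     out = ''
--     for i in range(0, len(bits), 8):
--         v = 0
--         for b in bits[i:i+8]:
--             v = 2 * v + b
--         if 192 <= v <= 255:
--             out += chr(v + 848)
--         elif v == 168:
--             out += 'Ё'
--         elif v == 184:
--             out += 'ё'
--         else:
--             out += chr(v)
--     return out
-- ===== Notes on version B (the rewrite author's own statement) =====
-- stated objective: faster
-- what changed: B reads only the first 16 hex chars (the only ones A's fixed 64-bit window uses), works on integer bit values instead of building and re-parsing binary digit strings, and emits the 7-bit-per-byte stream directly.
-- outside the precondition, e.g. on ctrlBitReverse(' 1'): A returns '\x00', B raises ValueError; on ctrlBitReverse('+1'): A returns '\x00', B raises ValueError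
import Mathlib
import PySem

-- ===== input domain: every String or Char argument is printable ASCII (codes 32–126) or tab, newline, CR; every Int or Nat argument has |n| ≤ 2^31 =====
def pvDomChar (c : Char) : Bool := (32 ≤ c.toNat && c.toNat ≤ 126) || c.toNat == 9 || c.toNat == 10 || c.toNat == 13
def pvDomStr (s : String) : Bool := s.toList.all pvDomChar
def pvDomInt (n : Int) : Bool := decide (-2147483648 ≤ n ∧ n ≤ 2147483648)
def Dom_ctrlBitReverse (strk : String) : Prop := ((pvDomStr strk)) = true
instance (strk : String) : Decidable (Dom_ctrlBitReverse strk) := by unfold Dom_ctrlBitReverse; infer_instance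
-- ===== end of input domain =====

-- B drops the parity bits arithmetically on the first 16 hex chars only (the only chars A's
-- fixed 64-bit window can use) instead of A's two generic string-translation passes over the
-- whole input; equivalence is proved on hex-digit inputs (Pre_ below).

-- ===== PORT A =====

-- str.zfill(w) — hand port; exact for ASCII strings (pads '0' after an optional leading sign)
def pyZfill (cs : List Char) (w : Nat) : List Char :=
  if w ≤ cs.length then cs
  else match cs with
    | c :: r => if c = '+' ∨ c = '-' then c :: (List.replicate (w - cs.length) '0' ++ r)
                else List.replicate (w - cs.length) '0' ++ cs
    | [] => List.replicate w '0'

-- str(hex(n))[2:] for n ≥ 0 (lower-case hex digits); exact for the nonnegative values A feeds it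
def natToHexChars (n : Nat) : List Char := Nat.toDigits 16 n

-- int(cs, b); '.getD 0' stands exactly where Python raises ValueError (excluded by Pre_)
def pvIntZ (cs : List Char) (b : Int) : Int := (PySem.Int.ofCharsBase? cs b).getD 0
def pvInt (cs : List Char) (b : Int) : Nat := (pvIntZ cs b).toNat

-- the character produced for one byte value by translate's b→s branch (branch order as in A)
def pvDecodeBS (t : Nat) : Char :=
  if (48 ≤ t ∧ t ≤ 57) ∨ (65 ≤ t ∧ t ≤ 90) ∨ (97 ≤ t ∧ t ≤ 122) then Char.ofNat t
  else if 192 ≤ t ∧ t ≤ 255 then Char.ofNat (t + 848)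
  else if t = 168 then 'Ё'
  else if t = 184 then 'ё'
  else Char.ofNat t

-- translate(strl, sys1, sys2), working on the string as List Char; ord = Char.toNat, chr = Char.ofNat
def translateL (strl : List Char) (sys1 sys2 : String) : List Char :=
  if sys1 = "b" then
    if sys2 = "b" then strl
    else if sys2 = "h" then
      ((PySem.List.pyRange 0 (strl.length : Int) 8).map
          (fun i => PySem.List.slice strl (some i) (some (i + 8)))).foldl
        (fun out i => out ++ pyZfill (natToHexChars (pvInt i 2)) 2) []
    else
      ((PySem.List.pyRange 0 (strl.length : Int) 8).map
          (fun i => PySem.List.slice strl (some i) (some (i + 8)))).foldl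
        (fun out i => out ++ [pvDecodeBS (pvInt i 2)]) []
  else if sys1 = "s" then
    if sys2 = "s" then strl
    else if sys2 = "b" then
      strl.foldl (fun out i =>
        if 1040 ≤ i.toNat ∧ i.toNat ≤ 1103 then
          out ++ pyZfill ((PySem.Int.toBinChars0b ((i.toNat : Int) - 848)).drop 2) 8
        else if i.toNat = 1105 then out ++ "10111000".toList
        else if i.toNat = 1025 then out ++ "10101000".toList
        else out ++ pyZfill ((PySem.Int.toBinChars0b (i.toNat : Int)).drop 2) 8) []
    else
      strl.foldl (fun out i =>
        if 1040 ≤ i.toNat ∧ i.toNat ≤ 1103 then out ++ pyZfill (natToHexChars (i.toNat - 848)) 2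
        else if i.toNat = 1105 then out ++ "b8".toList
        else if i.toNat = 1025 then out ++ "a8".toList
        else out ++ pyZfill (natToHexChars i.toNat) 2) []
  else
    if sys2 = "h" then strl
    else if sys2 = "s" then
      (PySem.List.pyRange 0 (strl.length : Int) 2).foldl
        (fun out i =>
          let t := pvInt (PySem.List.slice strl (some i) (some (i + 2))) 16
          out ++ [if 192 ≤ t ∧ t ≤ 255 then Char.ofNat (t + 848)
                  else if t = 168 then 'Ё'
                  else if t = 184 then 'ё'
                  else Char.ofNat t]) []
    else
      (PySem.List.pyRange 0 (strl.length : Int) 2).foldl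
        (fun out i =>
          out ++ pyZfill ((PySem.Int.toBinChars0b
            (pvIntZ (PySem.List.slice strl (some i) (some (i + 2))) 16)).drop 2) 8) []

def ctrlBitReverse (strk : String) : String :=
  let temp := translateL strk.toList "h" "b"
  let b := (PySem.List.pyRange 0 64 8).map (fun i => PySem.List.slice temp (some i) (some (i + 8)))
  let c := b.foldl (fun acc ch => acc ++ PySem.List.slice ch (some 0) (some 7)) []
  String.ofList (translateL c "b" "s")

-- ===== PORT B =====

-- ch.lower() for a single char; exact on ASCII
def lowerChar (c : Char) : Char := if 'A' ≤ c ∧ c ≤ 'Z' then Char.ofNat (c.toNat + 32) else c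

-- "0123456789abcdef".index(ch.lower()); '.getD 0' stands exactly where Python raises ValueError
def hexIdx (c : Char) : Nat := (PySem.List.index? "0123456789abcdef".toList (lowerChar c)).getD 0

def decodeByteB (v : Nat) : Char :=
  if 192 ≤ v ∧ v ≤ 255 then Char.ofNat (v + 848)
  else if v = 168 then 'Ё'
  else if v = 184 then 'ё'
  else Char.ofNat v

def ctrlBitReverse_alt (strk : String) : String :=
  let head := PySem.List.slice strk.toList none (some 16)
  let bits := (PySem.List.pyRange 0 (head.length : Int) 2).foldl
    (fun acc i =>
      let v := (PySem.List.slice head (some i) (some (i + 2))).foldl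
        (fun v ch => 16 * v + hexIdx ch) 0
      acc ++ (List.range 7).map (fun k => v >>> (7 - k) &&& 1)) []
  String.ofList ((PySem.List.pyRange 0 (bits.length : Int) 8).foldl
    (fun out i =>
      out ++ [decodeByteB ((PySem.List.slice bits (some i) (some (i + 8))).foldl
        (fun v b => 2 * v + b) 0)]) [])

-- ===== PRECONDITION & SPEC =====

-- Pre_ excludes inputs with a non-hex-digit character: there A usually raises ValueError, and the
-- few chunks int(·,16) still accepts (whitespace/sign forms like ' 1', '+1') make B raise instead.
def Pre_ctrlBitReverse (strk : String) : Prop :=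
  (strk.toList.all fun c => "0123456789abcdefABCDEF".toList.contains c) = true
instance (strk : String) : Decidable (Pre_ctrlBitReverse strk) := by
  unfold Pre_ctrlBitReverse; infer_instance

def pvWitness_ctrlBitReverse : String := "a3F09c1D5b2E4678"

def Spec_ctrlBitReverse (strk : String) (out : String) : Prop := out = ctrlBitReverse_alt strk
instance (strk : String) (out : String) : Decidable (Spec_ctrlBitReverse strk out) := by
  unfold Spec_ctrlBitReverse; infer_instance

-- ===== CLAIM (what is proved, stated in full; the proofs are below) =====
def Claim_equal_ctrlBitReverse : Prop :=
  ∀ (strk : String), Dom_ctrlBitReverse strk → Pre_ctrlBitReverse strk →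
    Spec_ctrlBitReverse strk (ctrlBitReverse strk)

-- ===== LEMMAS AND PROOFS =====

def HXL : List Char := "0123456789abcdefABCDEF".toList
def pvBitChar (b : Nat) : Char := if b = 1 then '1' else '0'
def pvBits8 (v : Nat) : List Nat := (List.range 8).map (fun k => v / 2 ^ (7 - k) % 2)
def pvCBits (L v : Nat) : List Char := (List.range L).map (fun k => pvBitChar (v / 2 ^ (L - 1 - k) % 2))
def pvVal (g : List Nat) : Nat := g.foldl (fun a b => 2 * a + b) 0
def pvPairs (s : List Char) : List Int := PySem.List.pyRange 0 (s.length : Int) 2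
def pvW (s : List Char) (i : Int) : Nat :=
  (PySem.List.slice s (some i) (some (i + 2))).foldl (fun v ch => 16 * v + hexIdx ch) 0

-- finite facts discharged by computation
lemma pv_hex1 : ∀ c ∈ HXL,
    PySem.Int.ofCharsBase? [c] 16 = some ((hexIdx c : Nat) : Int) ∧ hexIdx c < 16 := by
  have h : (HXL.all fun c =>
      (PySem.Int.ofCharsBase? [c] 16 == some ((hexIdx c : Nat) : Int)) && decide (hexIdx c < 16)) = true := by
    set_option maxRecDepth 4096 in decide
  intro c hc
  have := List.all_eq_true.mp h c hc
  simp only [Bool.and_eq_true, beq_iff_eq, decide_eq_true_eq] at this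
  exact this

lemma pv_hex2 : ∀ c ∈ HXL, ∀ d ∈ HXL,
    PySem.Int.ofCharsBase? [c, d] 16 = some ((16 * hexIdx c + hexIdx d : Nat) : Int) := by
  have h : (HXL.all fun c => HXL.all fun d =>
      PySem.Int.ofCharsBase? [c, d] 16 == some ((16 * hexIdx c + hexIdx d : Nat) : Int)) = true := by
    set_option maxRecDepth 4096 in decide
  intro c hc d hd
  have h1 := List.all_eq_true.mp h c hc
  have h2 := List.all_eq_true.mp h1 d hd
  exact beq_iff_eq.mp h2

lemma pv_enc256 : ∀ v : Nat, v < 256 →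
    pyZfill ((PySem.Int.toBinChars0b (v : Int)).drop 2) 8 = (pvBits8 v).map pvBitChar := by
  have h : ((List.range 256).all fun v =>
      pyZfill ((PySem.Int.toBinChars0b (v : Int)).drop 2) 8 == (pvBits8 v).map pvBitChar) = true := by
    set_option maxRecDepth 4096 in decide
  intro v hv
  exact beq_iff_eq.mp (List.all_eq_true.mp h v (List.mem_range.mpr hv))

lemma pv_dec256 : ∀ v : Nat, v < 256 → pvDecodeBS v = decodeByteB v := by
  have h : ((List.range 256).all fun v => pvDecodeBS v == decodeByteB v) = true := by
    set_option maxRecDepth 4096 in decide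
  intro v hv
  exact beq_iff_eq.mp (List.all_eq_true.mp h v (List.mem_range.mpr hv))

lemma pv_parse2 : ∀ L : Nat, 1 ≤ L → L ≤ 8 → ∀ v : Nat, v < 2 ^ L →
    PySem.Int.ofCharsBase? (pvCBits L v) 2 = some (v : Int) := by
  have h : ((List.range 9).all fun L => (List.range (2 ^ L)).all fun v =>
      (L == 0) || (PySem.Int.ofCharsBase? (pvCBits L v) 2 == some (v : Int))) = true := by
    set_option maxRecDepth 4096 in decide
  intro L h1 h8 v hv
  have hL := List.all_eq_true.mp h L (List.mem_range.mpr (by omega))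
  have := List.all_eq_true.mp hL v (List.mem_range.mpr hv)
  simp only [Bool.or_eq_true, beq_iff_eq] at this
  rcases this with h0 | h2
  · omega
  · exact h2

lemma pvCBits_succ (L v b : Nat) (hb : b < 2) :
    pvCBits (L + 1) (2 * v + b) = pvCBits L v ++ [pvBitChar b] := by
  unfold pvCBits
  rw [List.range_succ, List.map_append]
  congr 1
  · apply List.map_congr_left
    intro k hk
    have hkL : k < L := List.mem_range.mp hk
    have hm : L + 1 - 1 - k = (L - 1 - k) + 1 := by omega
    rw [hm]
    congr 2
    rw [pow_succ', ← Nat.div_div_eq_div_mul]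
    congr 1
    omega
  · simp only [List.map_cons, List.map_nil]
    congr 2
    have h0 : L + 1 - 1 - L = 0 := by omega
    rw [h0, pow_zero, Nat.div_one]
    omega

-- a list of bits is the binary expansion of its left fold
lemma pv_cbits : ∀ g : List Nat, (∀ b ∈ g, b < 2) →
    pvVal g < 2 ^ g.length ∧ g.map pvBitChar = pvCBits g.length (pvVal g) := by
  intro g
  induction g using List.reverseRecOn with
  | nil => intro _; refine ⟨by simp [pvVal], by simp [pvVal, pvCBits]⟩
  | append_singleton g b ih =>
    intro hb
    have hblt : b < 2 := hb b (by simp)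
    obtain ⟨ihlt, iheq⟩ := ih (fun x hx => hb x (by simp [hx]))
    have hval : pvVal (g ++ [b]) = 2 * pvVal g + b := by simp [pvVal, List.foldl_append]
    refine ⟨?_, ?_⟩
    · simp only [List.length_append, List.length_cons, List.length_nil, hval]
      have : 2 ^ (g.length + (0 + 1)) = 2 * 2 ^ g.length := by ring
      omega
    · rw [List.map_append, iheq, hval]
      simp only [List.length_append, List.length_cons, List.length_nil, List.map_cons,
        List.map_nil, Nat.zero_add]
      rw [pvCBits_succ g.length (pvVal g) b hblt]

lemma pv_flatten_drop {α : Type} : ∀ (m : Nat) (G : List (List α)),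
    (∀ g ∈ G, g.length = 8) → G.flatten.drop (8 * m) = (G.drop m).flatten := by
  intro m
  induction m with
  | zero => intro G _; simp
  | succ n ih =>
    intro G hG
    cases G with
    | nil => simp
    | cons g t =>
      have hg : g.length = 8 := hG g (by simp)
      rw [List.flatten_cons, List.drop_append, hg]
      have h1 : List.drop (8 * (n + 1)) g = [] := List.drop_eq_nil_of_le (by omega)
      have h2 : 8 * (n + 1) - 8 = 8 * n := by omega
      rw [h1, h2, List.nil_append, ih t (fun x hx => hG x (by simp [hx]))]
      simp

lemma pv_chunks {α : Type} : ∀ (m : Nat) (G : List (List α)), (∀ g ∈ G, g.length = 8) →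
    (List.range m).flatMap (fun k => (G.flatten.drop (8 * k)).take 7)
      = (G.take m).flatMap (fun g => g.take 7) := by
  intro m G hG
  induction m with
  | zero => simp
  | succ n ih =>
    rw [List.range_succ, List.flatMap_append, ih, List.take_add_one, List.flatMap_append]
    congr 1
    simp only [List.flatMap_cons, List.flatMap_nil, List.append_nil]
    rw [pv_flatten_drop n G hG]
    cases hd : G.drop n with
    | nil =>
      have hlen : G.length ≤ n := by
        have := congrArg List.length hd
        simp at this
        omega
      simp [List.getElem?_eq_none hlen]
    | cons g t =>
      have hgn : G[n]? = some g := by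
        have h0 : (List.drop n G)[0]? = G[n + 0]? := List.getElem?_drop
        simpa [hd] using h0.symm
      have hgmem : g ∈ G := List.mem_of_mem_drop (hd ▸ List.mem_cons_self)
      have hglen : g.length = 8 := hG g hgmem
      rw [hgn]
      simp only [Option.toList_some, List.flatMap_cons, List.flatMap_nil, List.append_nil]
      rw [List.flatten_cons, List.take_append, hglen]
      simp

-- the parse of one pair chunk, under Pre_
lemma pv_pair_parse (s : List Char) (hs : ∀ c ∈ s, c ∈ HXL) (i : Int) (hi : i ∈ pvPairs s) :
    PySem.Int.ofCharsBase? (PySem.List.slice s (some i) (some (i + 2))) 16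
        = some ((pvW s i : Nat) : Int) ∧ pvW s i < 256 := by
  rw [pvPairs, PySem.List.mem_pyRange_iff_of_pos (by norm_num)] at hi
  obtain ⟨h0, hlt, -⟩ := hi
  have hslice : PySem.List.slice s (some i) (some (i + 2)) = (s.drop i.toNat).take 2 := by
    rw [PySem.List.slice_toNat s h0 (by omega)]
    congr 1
    omega
  have hlen : i.toNat < s.length := by omega
  cases hd : s.drop i.toNat with
  | nil =>
    exfalso
    have := congrArg List.length hd
    simp [List.length_drop] at this
    omega
  | cons c rest =>
    have hc : c ∈ HXL := hs c (List.mem_of_mem_drop (hd ▸ List.mem_cons_self))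
    cases rest with
    | nil =>
      have hw : pvW s i = hexIdx c := by
        rw [pvW, hslice, hd]
        simp
      obtain ⟨hp, hb⟩ := pv_hex1 c hc
      rw [hslice, hd, hw]
      exact ⟨by simpa using hp, by omega⟩
    | cons d rest2 =>
      have hdm : d ∈ HXL := by
        refine hs d (List.mem_of_mem_drop (i := i.toNat) ?_)
        rw [hd]; exact List.mem_cons_of_mem _ List.mem_cons_self
      have hw : pvW s i = 16 * hexIdx c + hexIdx d := by
        rw [pvW, hslice, hd]
        simp [List.take, List.foldl]
      obtain ⟨-, hbc⟩ := pv_hex1 c hc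
      obtain ⟨-, hbd⟩ := pv_hex1 d hdm
      rw [hslice, hd, hw]
      refine ⟨?_, by omega⟩
      simpa using pv_hex2 c hc d hdm

-- A's first translate pass produces the bit-character stream of B's byte values
lemma pv_temp (s : List Char) (hs : ∀ c ∈ s, c ∈ HXL) :
    translateL s "h" "b"
      = ((pvPairs s).map (fun i => (pvBits8 (pvW s i)).map pvBitChar)).flatten := by
  rw [translateL, if_neg (by decide), if_neg (by decide), if_neg (by decide), if_neg (by decide)]
  rw [PySem.List.foldl_append_eq_flatMap, List.nil_append, ← List.flatMap_def]
  rw [List.flatMap_def, List.flatMap_def]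
  congr 1
  apply List.map_congr_left
  intro i hi
  obtain ⟨hp, hb⟩ := pv_pair_parse s hs i hi
  rw [pvIntZ, hp]
  exact pv_enc256 _ hb


lemma pv_range_take (n : Nat) :
    PySem.List.pyRange 0 ((min 16 n : Nat) : Int) 2 = (PySem.List.pyRange 0 (n : Int) 2).take 8 := by
  rw [PySem.List.pyRange_of_pos _ _ (by norm_num : (0:Int) < 2),
      PySem.List.pyRange_of_pos _ _ (by norm_num : (0:Int) < 2),
      ← List.map_take, List.take_range]
  congr 1
  split_ifs with h1 h2 h2
  · congr 1
    by_cases hn : n ≤ 16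
    · rw [show min 16 n = n from min_eq_right hn]
      omega
    · rw [show min 16 n = 16 from min_eq_left (by omega)]
      omega
  · exfalso; omega
  · exfalso; omega
  · rfl

lemma pv_head_chunk (s : List Char) (i : Int) (h0 : 0 ≤ i) (h16 : i + 2 ≤ 16) :
    PySem.List.slice (s.take 16) (some i) (some (i + 2)) = PySem.List.slice s (some i) (some (i + 2)) := by
  rw [PySem.List.slice_toNat _ h0 (by omega), PySem.List.slice_toNat _ h0 (by omega)]
  rw [List.drop_take, List.take_take]
  congr 1
  omega

lemma pv_bits7 (v : Nat) :
    (List.range 7).map (fun k => v >>> (7 - k) &&& 1) = (pvBits8 v).take 7 := by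
  rw [pvBits8, ← List.map_take, List.take_range]
  apply List.map_congr_left
  intro k _
  rw [Nat.and_one_is_mod, Nat.shiftRight_eq_div_pow]

lemma pv_decode_chunk (K : List Nat) (hK : ∀ b ∈ K, b < 2) (i : Int)
    (hi : i ∈ PySem.List.pyRange 0 (K.length : Int) 8) :
    pvDecodeBS (pvInt (PySem.List.slice (K.map pvBitChar) (some i) (some (i + 8))) 2)
      = decodeByteB ((PySem.List.slice K (some i) (some (i + 8))).foldl (fun v b => 2 * v + b) 0) := by
  rw [PySem.List.mem_pyRange_iff_of_pos (by norm_num)] at hi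
  obtain ⟨h0, hlt, -⟩ := hi
  have e8 : (i + 8).toNat - i.toNat = 8 := by omega
  rw [PySem.List.slice_toNat _ h0 (by omega), PySem.List.slice_toNat _ h0 (by omega), e8,
      ← List.map_drop, ← List.map_take]
  set g := (K.drop i.toNat).take 8 with hg
  have hgsub : ∀ b ∈ g, b < 2 := fun b hb => hK b (List.mem_of_mem_drop (List.mem_of_mem_take hb))
  have hglen8 : g.length ≤ 8 := by
    simp only [hg, List.length_take]
    omega
  have hgne : 1 ≤ g.length := by
    have hlN : i.toNat < K.length := by omega
    simp only [hg, List.length_take, List.length_drop]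
    omega
  obtain ⟨hlt2, heq⟩ := pv_cbits g hgsub
  have hparse := pv_parse2 g.length hgne hglen8 (pvVal g) hlt2
  rw [pvInt, pvIntZ, heq, hparse]
  have hv256 : pvVal g < 256 := by
    have : (2:Nat) ^ g.length ≤ 2 ^ 8 := Nat.pow_le_pow_right (by norm_num) hglen8
    omega
  have hgd : ((some ((pvVal g : Nat) : Int)).getD 0).toNat = pvVal g := by simp
  rw [hgd, pv_dec256 _ hv256]
  rfl

lemma pv_c_eq (s : List Char) (hs : ∀ c ∈ s, c ∈ HXL) :
    ((PySem.List.pyRange 0 64 8).map (fun i =>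
        PySem.List.slice (translateL s "h" "b") (some i) (some (i + 8)))).foldl
      (fun acc ch => acc ++ PySem.List.slice ch (some 0) (some 7)) []
    = (((pvPairs s).take 8).flatMap (fun i => (pvBits8 (pvW s i)).take 7)).map pvBitChar := by
  rw [pv_temp s hs]
  set G : List (List Char) := (pvPairs s).map (fun i => (pvBits8 (pvW s i)).map pvBitChar) with hG
  have hGlen : ∀ g ∈ G, g.length = 8 := by
    intro g hg
    rw [hG] at hg
    obtain ⟨i, -, rfl⟩ := List.mem_map.mp hg
    simp [pvBits8]
  have hr : PySem.List.pyRange 0 64 8 = (List.range 8).map (fun k => ((8 * k : Nat) : Int)) := by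
    decide
  rw [hr, List.map_map]
  have hcast : ∀ k : Nat, ((8 * k : Nat) : Int) + 8 = ((8 * k + 8 : Nat) : Int) := by
    intro k; push_cast; ring
  simp only [Function.comp_def, hcast, PySem.List.slice_natCast,
    Nat.add_sub_cancel_left, PySem.List.slice_zero_start]
  rw [List.foldl_map, PySem.List.foldl_append_eq_flatMap, List.nil_append]
  have hslice7 : ∀ L : List Char, PySem.List.slice L none (some 7) = L.take 7 := by
    intro L
    rw [PySem.List.slice_to L (by norm_num)]
    simp
  calc (List.range 8).flatMap (fun k =>
          PySem.List.slice ((G.flatten.drop (8 * k)).take 8) none (some 7))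
      = (List.range 8).flatMap (fun k => (G.flatten.drop (8 * k)).take 7) := by
        apply List.flatMap_congr
        intro k _
        rw [hslice7, List.take_take]
        norm_num
    _ = (G.take 8).flatMap (fun g => g.take 7) := pv_chunks 8 G hGlen
    _ = _ := by
        rw [hG, ← List.map_take, List.flatMap_map]
        rw [show (fun a => (List.map pvBitChar (pvBits8 (pvW s a))).take 7)
              = (fun a => List.map pvBitChar ((pvBits8 (pvW s a)).take 7)) from
            funext fun a => (List.map_take).symm]
        rw [← List.map_flatMap]

lemma pv_bits_eq (s : List Char) :
    (PySem.List.pyRange 0 (((PySem.List.slice s none (some 16)).length : Nat) : Int) 2).foldl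
      (fun acc i => acc ++ (List.range 7).map (fun k =>
        ((PySem.List.slice (PySem.List.slice s none (some 16)) (some i) (some (i + 2))).foldl
          (fun v ch => 16 * v + hexIdx ch) 0) >>> (7 - k) &&& 1)) []
    = ((pvPairs s).take 8).flatMap (fun i => (pvBits8 (pvW s i)).take 7) := by
  have hhead : PySem.List.slice s none (some 16) = s.take 16 := by
    rw [PySem.List.slice_to s (by norm_num)]
    simp
  rw [hhead, List.length_take, pv_range_take s.length,
      PySem.List.foldl_append_eq_flatMap, List.nil_append]
  apply List.flatMap_congr
  intro i hi
  have hi' : i ∈ PySem.List.pyRange 0 ((min 16 s.length : Nat) : Int) 2 := by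
    rw [pv_range_take]; exact hi
  rw [PySem.List.mem_pyRange_iff_of_pos (by norm_num)] at hi'
  obtain ⟨h0, hlt, hdvd⟩ := hi'
  have h16 : i + 2 ≤ 16 := by
    have hm : ((min 16 s.length : Nat) : Int) ≤ 16 := by
      have := Nat.min_le_left 16 s.length
      omega
    omega
  rw [pv_head_chunk s i h0 h16, pv_bits7]
  rfl

set_option maxHeartbeats 1000000 in
theorem pv_main (strk : String) (hpre : Pre_ctrlBitReverse strk) :
    ctrlBitReverse strk = ctrlBitReverse_alt strk := by
  have hs : ∀ c ∈ strk.toList, c ∈ HXL := by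
    intro c hc
    exact List.contains_iff_mem.mp (List.all_eq_true.mp hpre c hc)
  simp only [ctrlBitReverse, ctrlBitReverse_alt]
  refine congrArg String.ofList ?_
  rw [pv_c_eq strk.toList hs, pv_bits_eq strk.toList]
  set K := ((pvPairs strk.toList).take 8).flatMap
    (fun i => (pvBits8 (pvW strk.toList i)).take 7) with hK
  have hKbits : ∀ b ∈ K, b < 2 := by
    intro b hb
    rw [hK] at hb
    obtain ⟨i, -, hb2⟩ := List.mem_flatMap.mp hb
    obtain ⟨k, -, rfl⟩ := List.mem_map.mp (List.mem_of_mem_take hb2)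
    exact Nat.mod_lt _ (by norm_num)
  rw [translateL, if_pos rfl, if_neg (by decide), if_neg (by decide)]
  rw [List.foldl_map, List.length_map]
  apply PySem.List.foldl_congr_mem
  intro acc i hi
  congr 1
  rw [pv_decode_chunk K hKbits i hi]

-- ===== VERDICT (by name: the statement is the Claim_ definition above) =====
theorem ctrlBitReverse_spec : Claim_equal_ctrlBitReverse := by
  intro strk _ hpre
  unfold Spec_ctrlBitReverse
  exact pv_main strk hpre
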